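-- pv_equiv track=rewrite | github.com/bjc1102/aiagent-repo | week-3/1hjjun/version1/indexing.py | process_visual_table
-- ===== SOURCE A (Python) =====
-- def process_visual_table(table):
--     """
--     AI 가이드라인 반영:
--     1단계: Grid Recognition (격자화)
--     2단계: Data Inheritance (병합 셀 상속)
--     3단계: Semantic Mapping (문장 결합)
--     """
--     if not table or len(table) < 2: return ""
--
--     # 데이터 상속을 위한 메모리 (각 열의 최신 유효 데이터 저장)
--     col_memory = [None] * len(table[0])
--     rows_md = []
--
--     # 마크다운 헤더 생성
--     header = [str(c).replace("\n", " ").strip() if c else f"Column_{i}" for i, c in enumerate(table[0])]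
--     rows_md.append("| " + " | ".join(header) + " |")
--     rows_md.append("| " + " | ".join(["---"] * len(header)) + " |")
--
--     # 데이터 행 처리 (2단계: 상속 알고리즘)
--     for row in table[1:]:
--         processed_row = []
--         for i, cell in enumerate(row):
--             val = str(cell).replace("\n", " ").strip() if cell else ""
--
--             # [규칙] 빈칸이거나 '-' 이면 위쪽 셀의 데이터를 상속받음
--             if not val or val == "-":
--                 val = col_memory[i] if col_memory[i] else "-"
--
--             processed_row.append(val)
--             col_memory[i] = val # 다음 행을 위해 현재 값을 메모리에 저장
--
--         rows_md.append("| " + " | ".join(processed_row) + " |")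
--
--     return "\n".join(rows_md)
-- ===== SOURCE B (Python) =====
-- def process_visual_table(table):
--     # Column-major re-implementation: the header/data rows never change, so each
--     # column's merged-cell inheritance can be computed independently top-to-bottom.
--     if not table or len(table) < 2:
--         return ""
--     ncols = len(table[0])
--     header = [str(c).replace("\n", " ").strip() if c else f"Column_{i}"
--               for i, c in enumerate(table[0])]
--     data = table[1:]
--     grid = [[None] * len(row) for row in data]
--     for i in range(ncols):
--         memory = None
--         for j, row in enumerate(data):
--             if i < len(row):
--                 cell = row[i]
--                 val = str(cell).replace("\n", " ").strip() if cell else ""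
--                 if not val or val == "-":
--                     val = memory if memory else "-"
--                 grid[j][i] = val
--                 memory = val
--     lines = ["| " + " | ".join(header) + " |",
--              "| " + " | ".join(["---"] * ncols) + " |"]
--     lines += ["| " + " | ".join(r) + " |" for r in grid]
--     return "\n".join(lines)
-- ===== Notes on version B (the rewrite author's own statement) =====
-- stated objective: alternative
-- what changed: B builds the markdown column-major: for each column it forward-fills merged cells down the data rows into a pre-allocated grid, instead of A's row-major loop threading a shared per-column memory list; Pre_ excludes ragged tables with a data row longer than the header row, on which A raises IndexError (and B also fails).
import Mathlib
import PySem

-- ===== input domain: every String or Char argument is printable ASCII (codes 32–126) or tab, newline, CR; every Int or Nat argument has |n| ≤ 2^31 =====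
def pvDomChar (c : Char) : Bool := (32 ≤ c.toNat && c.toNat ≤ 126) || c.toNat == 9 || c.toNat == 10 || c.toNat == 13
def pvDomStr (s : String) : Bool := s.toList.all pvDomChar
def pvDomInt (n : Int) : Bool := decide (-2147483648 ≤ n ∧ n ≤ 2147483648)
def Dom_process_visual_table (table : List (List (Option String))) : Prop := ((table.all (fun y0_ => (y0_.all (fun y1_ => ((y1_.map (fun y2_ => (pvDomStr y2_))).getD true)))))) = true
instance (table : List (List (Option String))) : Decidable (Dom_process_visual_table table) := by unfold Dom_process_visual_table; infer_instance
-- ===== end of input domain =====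

-- B recomputes the same table column-by-column (per-column forward fill into a grid)
-- instead of A's row-by-row loop with a shared memory list; objective: alternative decomposition.

-- shared helpers: both Pythons contain the identical cell-cleaning / inheritance expressions
-- 'str(cell).replace("\n"," ").strip() if cell else ""' (cell is None or a str, so str(cell) = cell when truthy)
def pvClean (c : Option String) : String :=
  match c with
  | none => ""
  | some s => if s = "" then "" else PySem.Str.strip (PySem.Str.replace s "\n" " ")

-- 'val = clean; if not val or val == "-": val = mem if mem else "-"'   (mem holds the inherited value)
def pvStep (mem : Option String) (c : Option String) : String :=
  let v := pvClean c
  if v = "" ∨ v = "-" then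
    match mem with
    | none => "-"
    | some m => if m = "" then "-" else m
  else v

-- 'str(c).replace("\n"," ").strip() if c else f"Column_{i}"'
def pvHeaderCell (i : Int) (c : Option String) : String :=
  match c with
  | none => "Column_" ++ PySem.Int.toStr i
  | some s => if s = "" then "Column_" ++ PySem.Int.toStr i
              else PySem.Str.strip (PySem.Str.replace s "\n" " ")

-- '"| " + " | ".join(vs) + " |"'
def pvJoinRow (vs : List String) : String := "| " ++ PySem.Str.join " | " vs ++ " |"

-- ===== PORT A =====

-- inner loop 'for i, cell in enumerate(row)': col_memory[i] / col_memory[i]=val are in range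
-- under Pre_ (row no longer than table[0]); List.getD/List.set are exact there.
def pvInnerA : List (Option String) → Nat → List (Option String) → List String × List (Option String)
  | [], _, mem => ([], mem)
  | cell :: rest, i, mem =>
    let v := pvStep (mem.getD i none) cell
    let mem' := mem.set i (some v)
    let r := pvInnerA rest (i + 1) mem'
    (v :: r.1, r.2)

-- outer loop 'for row in table[1:]'
def pvOuterA : List (List (Option String)) → List (Option String) → List String
  | [], _ => []
  | row :: rest, mem =>
    let r := pvInnerA row 0 mem
    pvJoinRow r.1 :: pvOuterA rest r.2

def process_visual_table (table : List (List (Option String))) : String :=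
  if table.length < 2 then ""   -- 'if not table or len(table) < 2: return ""'
  else
    let h := table.headD []     -- table[0]
    let header := (PySem.List.enumerate h 0).map (fun p => pvHeaderCell p.1 p.2)
    let body := pvOuterA (table.drop 1) (List.replicate h.length none)
    PySem.Str.join "\n" (pvJoinRow header :: pvJoinRow (List.replicate header.length "---") :: body)

-- ===== PORT B =====

-- one pass down column i: 'for j, row in enumerate(data): if i < len(row): … grid[j][i] = val; memory = val'
-- (grid rows walk in step with data rows; grid[j][i]=val is List.set, in range since grid row j has len(data[j]) slots)
def pvColPass (i : Nat) (memory : Option String) :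
    List (List (Option String)) → List (List (Option String)) → List (List (Option String))
  | [], _ => []
  | g :: gs, [] => g :: gs
  | g :: gs, row :: rows =>
    if i < row.length then
      let v := pvStep memory (row.getD i none)
      g.set i (some v) :: pvColPass i (some v) gs rows
    else
      g :: pvColPass i memory gs rows

def process_visual_table_alt (table : List (List (Option String))) : String :=
  if table.length < 2 then ""
  else
    let h := table.headD []
    let ncols := h.length
    let header := (PySem.List.enumerate h 0).map (fun p => pvHeaderCell p.1 p.2)
    let data := table.drop 1
    let grid0 := data.map (fun row => List.replicate row.length (none : Option String))
    let grid := (List.range ncols).foldl (fun g i => pvColPass i none g data) grid0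
    -- '" | ".join(r)': inside Pre_ every grid slot was filled, so each entry is 'some'
    let lines := pvJoinRow header :: pvJoinRow (List.replicate ncols "---") ::
                 grid.map (fun r => pvJoinRow (r.map (fun o => o.getD "")))
    PySem.Str.join "\n" lines

-- ===== PRECONDITION & SPEC =====
-- Pre_ excludes exactly the ragged tables with a data row longer than table[0]:
-- there A raises IndexError on col_memory[i] (and B's natural grid also fails), so no value is claimed.
def Pre_process_visual_table (table : List (List (Option String))) : Prop :=
  ∀ row ∈ table.drop 1, row.length ≤ (table.headD []).length

instance (table : List (List (Option String))) : Decidable (Pre_process_visual_table table) := by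
  unfold Pre_process_visual_table; infer_instance

def pvWitness_process_visual_table : List (List (Option String)) :=
  [[some "A", some "B"], [some "1", none], [some "-", some "x"]]

def Spec_process_visual_table (table : List (List (Option String))) (out : String) : Prop := out = process_visual_table_alt table
instance (table : List (List (Option String))) (out : String) : Decidable (Spec_process_visual_table table out) := by unfold Spec_process_visual_table; infer_instance

-- ===== CLAIM (what is proved, stated in full; the proofs are below) =====
def Claim_equal_process_visual_table : Prop := ∀ (table : List (List (Option String))), Dom_process_visual_table table → Pre_process_visual_table table → Spec_process_visual_table table (process_visual_table table)

-- ===== LEMMAS AND PROOFS =====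

-- the per-column memory after a list of rows (only rows long enough touch column i)
def pvColMem (i : Nat) (rows : List (List (Option String))) (m : Option String) : Option String :=
  rows.foldl (fun acc row => if i < row.length then some (pvStep acc (row.getD i none)) else acc) m

-- the reference value at data row j, column i
def pvVal (data : List (List (Option String))) (j i : Nat) : String :=
  pvStep (pvColMem i (data.take j) none) ((data.getD j []).getD i none)

theorem pvInnerA_spec (row : List (Option String)) :
    ∀ (i : Nat) (mem : List (Option String)), i + row.length ≤ mem.length →
      (pvInnerA row i mem).1
        = (List.range row.length).map (fun k => pvStep (mem.getD (i + k) none) (row.getD k none))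
      ∧ (pvInnerA row i mem).2.length = mem.length
      ∧ ∀ p, (pvInnerA row i mem).2.getD p none
          = if i ≤ p ∧ p < i + row.length
            then some (pvStep (mem.getD p none) (row.getD (p - i) none))
            else mem.getD p none := by
  induction row with
  | nil =>
    intro i mem h
    refine ⟨by simp [pvInnerA], by simp [pvInnerA], ?_⟩
    intro p
    have : ¬ (i ≤ p ∧ p < i + List.length ([] : List (Option String))) := by
      simp only [List.length_nil]; omega
    simp [pvInnerA, this]
  | cons c rest ih =>
    intro i mem h
    simp only [List.length_cons] at h
    have hlt : i < mem.length := by omega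
    set v := pvStep (mem.getD i none) c with hv
    set mem' := mem.set i (some v) with hmem'
    have hset : mem'.length = mem.length := by simp [hmem']
    obtain ⟨h1, h2, h3⟩ := ih (i + 1) mem' (by rw [hset]; omega)
    have hne : ∀ p, p ≠ i → mem'.getD p none = mem.getD p none := by
      intro p hp
      simp [hmem', List.getD, List.getElem?_set_ne (by omega : i ≠ p)]
    have hgi : mem'.getD i none = some v := by
      simp [hmem', List.getD, List.getElem?_set_self, hlt]
    refine ⟨?_, ?_, ?_⟩
    · show v :: (pvInnerA rest (i + 1) mem').1 = _
      rw [h1]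
      simp only [List.length_cons, List.range_succ_eq_map, List.map_cons, List.map_map]
      refine List.cons_eq_cons.mpr ⟨by simp [hv], ?_⟩
      apply List.map_congr_left
      intro k hk
      simp only [Function.comp_apply]
      rw [hne (i + 1 + k) (by omega)]
      have e1 : i + 1 + k = i + (k + 1) := by omega
      rw [e1, List.getD_cons_succ]
    · show (pvInnerA rest (i + 1) mem').2.length = mem.length
      rw [h2, hset]
    · intro p
      show (pvInnerA rest (i + 1) mem').2.getD p none = _
      rw [h3 p]
      by_cases hp : p = i
      · subst hp
        have c1 : ¬ (p + 1 ≤ p ∧ p < p + 1 + rest.length) := by omega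
        have c2 : p ≤ p ∧ p < p + (rest.length + 1) := by omega
        simp only [c1, if_false, c2, if_true, List.length_cons]
        rw [hgi]
        simp [hv, List.getD_cons_zero]
      · by_cases hin : i + 1 ≤ p ∧ p < i + 1 + rest.length
        · have c2 : i ≤ p ∧ p < i + (rest.length + 1) := by omega
          simp only [hin, if_true, c2, List.length_cons]
          rw [hne p hp]
          have e1 : p - i = (p - (i + 1)) + 1 := by omega
          rw [e1, List.getD_cons_succ]
        · have c2 : ¬ (p < i + (rest.length + 1)) ∨ ¬ (i ≤ p) := by omega
          have c2' : ¬ (i ≤ p ∧ p < i + (rest.length + 1)) := by omega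
          simp only [hin, if_false, c2', List.length_cons]
          exact hne p hp

theorem pvColMem_append_singleton (i : Nat) (hs : List (List (Option String))) (r : List (Option String)) (m : Option String) :
    pvColMem i (hs ++ [r]) m
      = if i < r.length then some (pvStep (pvColMem i hs m) (r.getD i none)) else pvColMem i hs m := by
  simp [pvColMem, List.foldl_append]

theorem pvOuterA_spec :
    ∀ (rows : List (List (Option String))) (mem : List (Option String))
      (hist : List (List (Option String))),
      (∀ r ∈ rows, r.length ≤ mem.length) →
      (∀ p, mem.getD p none = pvColMem p hist none) →
      pvOuterA rows mem
        = (List.range rows.length).map (fun j =>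
            pvJoinRow ((List.range ((rows.getD j []).length)).map (fun k =>
              pvStep (pvColMem k ((hist ++ rows).take (hist.length + j)) none)
                     ((rows.getD j []).getD k none)))) := by
  intro rows
  induction rows with
  | nil => intro mem hist _ _; simp [pvOuterA]
  | cons row rest ih =>
    intro mem hist hlen hmem
    obtain ⟨h1, h2, h3⟩ := pvInnerA_spec row 0 mem (by simpa using hlen row (by simp))
    show pvJoinRow (pvInnerA row 0 mem).1 :: pvOuterA rest (pvInnerA row 0 mem).2 = _
    have hmem' : ∀ p, (pvInnerA row 0 mem).2.getD p none = pvColMem p (hist ++ [row]) none := by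
      intro p
      rw [h3 p, pvColMem_append_singleton]
      by_cases hp : p < row.length
      · have hc : 0 ≤ p ∧ p < 0 + row.length := by omega
        simp only [hc, if_true, hp, Nat.sub_zero, hmem p]
        simp
      · have hc : ¬ (0 ≤ p ∧ p < 0 + row.length) := by omega
        simp only [hc, if_false, hp, hmem p]
    have hlen' : ∀ r ∈ rest, r.length ≤ (pvInnerA row 0 mem).2.length := by
      intro r hr; rw [h2]; exact hlen r (by simp [hr])
    rw [ih (pvInnerA row 0 mem).2 (hist ++ [row]) hlen' hmem']
    simp only [List.length_cons, List.range_succ_eq_map, List.map_cons, List.map_map]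
    refine List.cons_eq_cons.mpr ⟨?_, ?_⟩
    · rw [h1]
      have ht : (hist ++ row :: rest).take (hist.length + 0) = hist := by
        simpa using List.take_left hist (row :: rest)
      simp only [List.getD_cons_zero, ht]
      apply congrArg
      apply List.map_congr_left
      intro k hk
      simp only [Nat.zero_add]
      rw [hmem k]
    · apply List.map_congr_left
      intro j hj
      simp only [Function.comp_apply, List.getD_cons_succ]
      have ht : (hist ++ [row]) ++ rest = hist ++ row :: rest := by simp
      have hl : (hist ++ [row]).length + j = hist.length + (j + 1) := by simp; omega
      rw [ht, hl]

theorem pvColMem_cons (i : Nat) (r : List (Option String)) (rs : List (List (Option String))) (m : Option String) :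
    pvColMem i (r :: rs) m
      = pvColMem i rs (if i < r.length then some (pvStep m (r.getD i none)) else m) := by
  by_cases h : i < r.length <;> simp [pvColMem, h]

theorem pvColPass_spec (i : Nat) :
    ∀ (data grid : List (List (Option String))) (m : Option String),
      grid.length = data.length →
      (pvColPass i m grid data).length = grid.length
      ∧ ∀ j, (pvColPass i m grid data).getD j []
          = if i < (data.getD j []).length
            then (grid.getD j []).set i (some (pvStep (pvColMem i (data.take j) m) ((data.getD j []).getD i none)))
            else grid.getD j [] := by
  intro data
  induction data with
  | nil =>
    intro grid m hg
    have hnil : grid = [] := List.eq_nil_of_length_eq_zero (by simp [hg])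
    subst hnil
    refine ⟨rfl, ?_⟩
    intro j
    cases j <;> simp [pvColPass]
  | cons row rows ih =>
    intro grid m hg
    cases grid with
    | nil => simp at hg
    | cons g gs =>
      have hg' : gs.length = rows.length := by simpa using hg
      by_cases hi : i < row.length
      · obtain ⟨ih1, ih2⟩ := ih gs (some (pvStep m (row.getD i none))) hg'
        constructor
        · simp only [pvColPass, hi, if_true, List.length_cons]
          rw [ih1]
        · intro j
          cases j with
          | zero =>
            simp [pvColPass, hi, pvColMem]
          | succ j =>
            simp only [pvColPass, hi, if_true, List.getD_cons_succ]
            rw [ih2 j]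
            have ht : (row :: rows).take (j + 1) = row :: rows.take j := rfl
            rw [ht, pvColMem_cons]
            simp [hi]
      · obtain ⟨ih1, ih2⟩ := ih gs m hg'
        constructor
        · simp only [pvColPass, hi, if_false, List.length_cons]
          rw [ih1]
        · intro j
          cases j with
          | zero =>
            simp [pvColPass, hi]
          | succ j =>
            simp only [pvColPass, hi, if_false, List.getD_cons_succ]
            rw [ih2 j]
            have ht : (row :: rows).take (j + 1) = row :: rows.take j := rfl
            rw [ht, pvColMem_cons]
            simp [hi]

theorem pvFold_spec (data : List (List (Option String))) (n : Nat) :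
    ((List.range n).foldl (fun g i => pvColPass i none g data)
        (data.map (fun row => List.replicate row.length (none : Option String)))).length = data.length
    ∧ ∀ j,
      (((List.range n).foldl (fun g i => pvColPass i none g data)
          (data.map (fun row => List.replicate row.length (none : Option String)))).getD j []).length
        = (data.getD j []).length
      ∧ ∀ q, (((List.range n).foldl (fun g i => pvColPass i none g data)
            (data.map (fun row => List.replicate row.length (none : Option String)))).getD j []).getD q none
          = if q < n ∧ q < (data.getD j []).length then some (pvVal data j q) else none := by
  induction n with
  | zero =>
    refine ⟨by simp, ?_⟩
    intro j
    simp only [List.range_zero, List.foldl_nil]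
    have hg0 : (data.map (fun row => List.replicate row.length (none : Option String))).getD j []
        = List.replicate ((data.getD j []).length) none := by
      by_cases hj : j < data.length
      · simp [List.getD, List.getElem?_map, List.getElem?_eq_getElem, hj]
      · have h1 : (data.map (fun row => List.replicate row.length (none : Option String)))[j]? = none := by
          rw [List.getElem?_eq_none_iff]; simpa using by omega
        have h2 : data[j]? = none := by rw [List.getElem?_eq_none_iff]; omega
        simp [List.getD, h1, h2]
    rw [hg0]
    refine ⟨by simp, ?_⟩
    intro q
    have : ¬ (q < 0 ∧ q < (data.getD j []).length) := by omega
    simp [this, List.getD]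
  | succ n ih =>
    obtain ⟨ih1, ih2⟩ := ih
    rw [List.range_succ, List.foldl_append, List.foldl_cons, List.foldl_nil]
    set G := (List.range n).foldl (fun g i => pvColPass i none g data)
        (data.map (fun row => List.replicate row.length (none : Option String))) with hG
    obtain ⟨p1, p2⟩ := pvColPass_spec n data G none ih1
    refine ⟨by rw [p1, ih1], ?_⟩
    intro j
    obtain ⟨len_j, get_j⟩ := ih2 j
    rw [p2 j]
    by_cases hn : n < (data.getD j []).length
    · simp only [hn, if_true]
      refine ⟨by simpa using len_j, ?_⟩
      intro q
      by_cases hq : q = n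
      · subst hq
        have hlt : q < (G[j]?.getD []).length := by
          show q < (G.getD j []).length
          rw [len_j]; exact hn
        simp only [List.getD]
        rw [List.getElem?_set_self hlt]
        have hc : q < q + 1 ∧ q < (data[j]?.getD []).length := ⟨by omega, hn⟩
        rw [if_pos hc]
        rfl
      · simp only [List.getD, List.getElem?_set_ne (by omega : n ≠ q)]
        have := get_j q
        simp only [List.getD] at this
        rw [this]
        by_cases h1 : q < n ∧ q < (data.getD j []).length
        · have h1' : q < n ∧ q < (data[j]?.getD []).length := h1
          have h2' : q < n + 1 ∧ q < (data[j]?.getD []).length := ⟨by omega, h1.2⟩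
          rw [if_pos h1', if_pos h2']
        · have h1' : ¬ (q < n ∧ q < (data[j]?.getD []).length) := h1
          have h2' : ¬ (q < n + 1 ∧ q < (data[j]?.getD []).length) := by
            intro h
            exact h1' ⟨by omega, h.2⟩
          rw [if_neg h1', if_neg h2']
    · simp only [hn, if_false]
      refine ⟨len_j, ?_⟩
      intro q
      rw [get_j q]
      by_cases h1 : q < n ∧ q < (data.getD j []).length
      · have h2 : q < n + 1 ∧ q < (data.getD j []).length := by omega
        rw [if_pos h1, if_pos h2]
      · have h2 : ¬ (q < n + 1 ∧ q < (data.getD j []).length) := by omega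
        rw [if_neg h1, if_neg h2]


-- ===== VERDICT (by name: the statement is the Claim_ definition above) =====
theorem process_visual_table_spec : Claim_equal_process_visual_table := by
  unfold Claim_equal_process_visual_table
  intro table _ hpre
  unfold Spec_process_visual_table
  unfold process_visual_table process_visual_table_alt
  by_cases ht : table.length < 2
  · simp only [ht, if_true]
  · simp only [ht, if_false]
    set h := table.headD [] with hh
    set data := table.drop 1 with hdata
    have hlen : ∀ r ∈ data, r.length ≤ h.length := hpre
    -- body of A
    have hA : pvOuterA data (List.replicate h.length none)
        = (List.range data.length).map (fun j =>
            pvJoinRow ((List.range ((data.getD j []).length)).map (fun k => pvVal data j k))) := by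
      rw [pvOuterA_spec data (List.replicate h.length none) []
        (by intro r hr; simpa using hlen r hr)
        (by
          intro p
          simp only [pvColMem, List.foldl_nil, List.getD, List.getElem?_replicate]
          split <;> rfl)]
      apply List.map_congr_left
      intro j hj
      simp only [List.nil_append, List.length_nil, Nat.zero_add]
      rfl
    -- body of B
    obtain ⟨f1, f2⟩ := pvFold_spec data h.length
    set grid := (List.range h.length).foldl (fun g i => pvColPass i none g data)
        (data.map (fun row => List.replicate row.length (none : Option String))) with hgrid
    have hB : grid.map (fun r => pvJoinRow (r.map (fun o => o.getD "")))
        = (List.range data.length).map (fun j =>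
            pvJoinRow ((List.range ((data.getD j []).length)).map (fun k => pvVal data j k))) := by
      apply List.ext_getElem
      · simp [f1]
      · intro j hj1 hj2
        have hjd : j < data.length := by simpa [f1] using hj1
        obtain ⟨lj, gj⟩ := f2 j
        have hrowj : grid[j] = grid.getD j [] := by
          rw [List.getD_eq_getElem?_getD, List.getElem?_eq_getElem (by simpa [f1] using hjd)]
          rfl
        simp only [List.getElem_map, List.getElem_range]
        rw [hrowj]
        congr 1
        apply List.ext_getElem
        · simp only [List.length_map, List.length_range]; exact lj
        · intro q hq1 hq2
          have hqlen : q < (data.getD j []).length := by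
            rw [← lj]; simpa using hq1
          have hqcols : q < h.length := by
            have hmem : data.getD j [] ∈ data := by
              rw [List.getD_eq_getElem?_getD, List.getElem?_eq_getElem hjd]
              exact List.getElem_mem hjd
            exact lt_of_lt_of_le hqlen (hlen _ hmem)
          have hget : (grid.getD j []).getD q none = some (pvVal data j q) := by
            rw [gj q, if_pos ⟨hqcols, hqlen⟩]
          have hq' : q < (grid.getD j []).length := by rw [lj]; exact hqlen
          have hgetE : (grid.getD j [])[q] = some (pvVal data j q) := by
            have := hget
            rw [List.getD_eq_getElem?_getD, List.getElem?_eq_getElem hq'] at this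
            simpa using this
          simp only [List.getElem_map, List.getElem_range]
          show ((grid.getD j [])[q]'hq').getD "" = pvVal data j q
          rw [hgetE]
          rfl
    rw [hA, hB]
    simp [PySem.List.length_enumerate]
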